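-- pv_equiv track=rewrite | github.com/eloqlo/Code_Interview | 200sol/CodeInterview_book/dfs_bfs_search/351.py | solution
-- ===== SOURCE A (Python) =====
-- def solution(arr, t_arr):
--
--     N = len(arr)
--     count=0
--     for w1 in range(N**2):
--         for w2 in range(w1+1,N**2):
--             for w3 in range(w2+1,N**2):
--                 count+=1
--                 r1, c1 = w1 // N, w1 % N
--                 r2, c2 = w2 // N, w2 % N
--                 r3, c3 = w3 // N, w3 % N
--                 arr_copy = [line.copy() for line in arr]
--                 if arr_copy[r1][c1]!="X" or arr_copy[r2][c2]!="X" or arr_copy[r3][c3]!="X":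
--                     continue
--                 else:
--                     arr_copy[r1][c1] = arr_copy[r2][c2] = arr_copy[r3][c3] = "O"
--                 if not get_caught(arr_copy, t_arr, count):
--                     return "YES"
--
--     return "NO"
--
-- def get_caught(arr, t_arr, count):
--     # print_map(arr, count)
--     arr_copy = [line.copy() for line in arr]
--     dr=[1,-1,0,0]
--     dc=[0,0,1,-1]
--     for di in range(4):
--         for r,c in t_arr:
--             for i in range(1,len(arr)):
--                 nr = r + dr[di]*i
--                 nc = c + dc[di]*i
--                 if 0<=nr<len(arr) and 0<=nc<len(arr):
--                     if arr[nr][nc] == "O":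
--                         break
--                     elif arr[nr][nc] == "S":
--                         return True
--                     else:
--                         arr_copy[nr][nc] = "*"
--                         continue
--                 else:
--                     break
--
--     return False
-- ===== SOURCE B (Python) =====
-- def solution(arr, t_arr):
--     N = len(arr)
--     empties = 0
--     for r in range(N):
--         for c in range(N):
--             if arr[r][c] == "X":
--                 empties += 1
--     if empties < 3:
--         return "NO"
--     segs = sight_segments(arr, t_arr)
--     return "YES" if cover(segs, [], 3) else "NO"
--
-- def sight_segments(arr, t_arr):
--     # one blocking constraint per visible teacher->student line of sight:
--     # the empty ("X") cells strictly between them, where a wall could go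
--     N = len(arr)
--     segs = []
--     for r, c in t_arr:
--         for dr, dc in ((1, 0), (-1, 0), (0, 1), (0, -1)):
--             cells = []
--             for i in range(1, N):
--                 nr, nc = r + dr * i, c + dc * i
--                 if not (0 <= nr < N and 0 <= nc < N):
--                     break
--                 kind = arr[nr][nc]
--                 if kind == "O":
--                     break
--                 if kind == "S":
--                     segs.append(cells)
--                     break
--                 if kind == "X":
--                     cells.append((nr, nc))
--     return segs
--
-- def cover(segs, walls, depth):
--     # branch on the first constraint not yet hit by a wall
--     for cells in segs:
--         if not any(w in cells for w in walls):
--             if depth == 0: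
--                 return False
--             return any(cover(segs, walls + [cell], depth - 1) for cell in cells)
--     return True
-- ===== Notes on version B (the rewrite author's own statement) =====
-- stated objective: faster
-- what changed: B never enumerates wall triples: it extracts each teacher's sight lines once as blocking constraints (the in-grid 'X' cells strictly between a teacher and the first visible student) and runs a depth-3 branching hitting-set search that branches only on the cells of the first unblocked constraint, with a one-line guard that at least 3 empty cells exist (A must place exactly 3 walls).
-- outside the precondition, e.g. on solution([['X', 'X'], ['X']], []): A returns 'YES', B raises IndexError
import Mathlib
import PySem

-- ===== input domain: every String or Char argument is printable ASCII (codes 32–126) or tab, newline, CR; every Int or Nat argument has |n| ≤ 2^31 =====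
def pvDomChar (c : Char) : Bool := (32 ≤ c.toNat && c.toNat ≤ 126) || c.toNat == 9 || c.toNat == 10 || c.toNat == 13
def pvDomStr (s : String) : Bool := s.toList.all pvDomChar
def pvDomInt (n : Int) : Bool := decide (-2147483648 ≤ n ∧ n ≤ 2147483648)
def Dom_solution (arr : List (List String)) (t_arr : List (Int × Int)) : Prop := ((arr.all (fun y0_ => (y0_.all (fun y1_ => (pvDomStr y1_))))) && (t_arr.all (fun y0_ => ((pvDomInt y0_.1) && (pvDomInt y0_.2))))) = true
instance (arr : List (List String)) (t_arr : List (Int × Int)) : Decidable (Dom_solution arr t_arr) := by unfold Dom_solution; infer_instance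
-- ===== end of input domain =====

-- ===== PORT A =====
-- B replaces A's triple enumeration by a one-pass extraction of sight-line constraints plus a
-- depth-3 branching hitting-set search (objective: faster).
-- Grid read g[r][c] / write g[r][c] = v; exact wherever A/B index (indices there satisfy 0 ≤ r < len g, 0 ≤ c < len row).
def gGet (g : List (List String)) (r c : Int) : String :=
  (PySem.List.pyGet? ((PySem.List.pyGet? g r).getD []) c).getD ""

def gSet (g : List (List String)) (r c : Int) (v : String) : List (List String) :=
  g.set r.toNat (((PySem.List.pyGet? g r).getD []).set c.toNat v)

-- inner ray loop of get_caught: 'for i in range(1, len(arr))' with break/return, threading arr_copy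
def gcRay (arr : List (List String)) (N r c dr dc : Int) :
    List Int → List (List String) → Bool × List (List String)
  | [], ac => (false, ac)
  | i :: is, ac =>
    let nr := r + dr * i
    let nc := c + dc * i
    if 0 ≤ nr ∧ nr < N ∧ 0 ≤ nc ∧ nc < N then
      if gGet arr nr nc == "O" then (false, ac)
      else if gGet arr nr nc == "S" then (true, ac)
      else gcRay arr N r c dr dc is (gSet ac nr nc "*")
    else (false, ac)

-- 'for r, c in t_arr' loop of get_caught
def gcTeach (arr : List (List String)) (N dr dc : Int) :
    List (Int × Int) → List (List String) → Bool × List (List String)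
  | [], ac => (false, ac)
  | (r, c) :: ts, ac =>
    match gcRay arr N r c dr dc (PySem.List.pyRange 1 N 1) ac with
    | (true, ac') => (true, ac')
    | (false, ac') => gcTeach arr N dr dc ts ac'

-- 'for di in range(4)' loop of get_caught
def gcDirs (arr : List (List String)) (t_arr : List (Int × Int)) (N : Int) :
    List Int → List (List String) → Bool × List (List String)
  | [], ac => (false, ac)
  | di :: ds, ac =>
    let dr := (PySem.List.pyGet? ([1, -1, 0, 0] : List Int) di).getD 0
    let dc := (PySem.List.pyGet? ([0, 0, 1, -1] : List Int) di).getD 0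
    match gcTeach arr N dr dc t_arr ac with
    | (true, ac') => (true, ac')
    | (false, ac') => gcDirs arr t_arr N ds ac'

-- get_caught(arr, t_arr, count); 'arr_copy = [line.copy() for line in arr]' is arr itself as a value;
-- count is unused by the Python body (its only use, a print, is commented out)
def get_caught (arr : List (List String)) (t_arr : List (Int × Int)) (count : Int) : Bool :=
  (gcDirs arr t_arr (PySem.List.len arr) (PySem.List.pyRange 0 4 1) arr).1

-- innermost 'for w3 in range(w2+1, N**2)' of solution, threading count
def aLoop3 (arr : List (List String)) (t_arr : List (Int × Int)) (N w1 w2 : Int) :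
    List Int → Int → Option String × Int
  | [], count => (none, count)
  | w3 :: ws, count =>
    let count := count + 1
    let r1 := PySem.Int.floordiv w1 N; let c1 := PySem.Int.mod w1 N
    let r2 := PySem.Int.floordiv w2 N; let c2 := PySem.Int.mod w2 N
    let r3 := PySem.Int.floordiv w3 N; let c3 := PySem.Int.mod w3 N
    if ¬(gGet arr r1 c1 == "X") ∨ ¬(gGet arr r2 c2 == "X") ∨ ¬(gGet arr r3 c3 == "X") then
      aLoop3 arr t_arr N w1 w2 ws count
    else
      let arr_copy := gSet (gSet (gSet arr r1 c1 "O") r2 c2 "O") r3 c3 "O"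
      if !(get_caught arr_copy t_arr count) then (some "YES", count)
      else aLoop3 arr t_arr N w1 w2 ws count

def aLoop2 (arr : List (List String)) (t_arr : List (Int × Int)) (N w1 : Int) :
    List Int → Int → Option String × Int
  | [], count => (none, count)
  | w2 :: ws, count =>
    match aLoop3 arr t_arr N w1 w2 (PySem.List.pyRange (w2 + 1) (N ^ 2) 1) count with
    | (some s, ct) => (some s, ct)
    | (none, ct) => aLoop2 arr t_arr N w1 ws ct

def aLoop1 (arr : List (List String)) (t_arr : List (Int × Int)) (N : Int) :
    List Int → Int → Option String × Int
  | [], count => (none, count)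
  | w1 :: ws, count =>
    match aLoop2 arr t_arr N w1 (PySem.List.pyRange (w1 + 1) (N ^ 2) 1) count with
    | (some s, ct) => (some s, ct)
    | (none, ct) => aLoop1 arr t_arr N ws ct

def solution (arr : List (List String)) (t_arr : List (Int × Int)) : String :=
  let N := PySem.List.len arr
  match (aLoop1 arr t_arr N (PySem.List.pyRange 0 (N ^ 2) 1) 0).1 with
  | some s => s
  | none => "NO"

-- ===== PORT B =====
-- Source B's inner ray loop of sight_segments: walk 'for i in range(1, N)' collecting the 'X' cells,
-- return some cells at the first visible "S" (one blocking constraint), none otherwise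
def rayWalk (arr : List (List String)) (N r c dr dc : Int) :
    List Int → List (Int × Int) → Option (List (Int × Int))
  | [], _ => none
  | i :: is, cells =>
    let nr := r + dr * i
    let nc := c + dc * i
    if ¬(0 ≤ nr ∧ nr < N ∧ 0 ≤ nc ∧ nc < N) then none
    else if gGet arr nr nc == "O" then none
    else if gGet arr nr nc == "S" then some cells
    else if gGet arr nr nc == "X" then rayWalk arr N r c dr dc is (cells ++ [(nr, nc)])
    else rayWalk arr N r c dr dc is cells

-- Source B's sight_segments: nested 'for (r,c) in t_arr / for (dr,dc) in dirs' appending at most one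
-- constraint per ray
def sight_segments (arr : List (List String)) (t_arr : List (Int × Int)) : List (List (Int × Int)) :=
  t_arr.flatMap (fun p =>
    ([(1, 0), (-1, 0), (0, 1), (0, -1)] : List (Int × Int)).filterMap (fun d =>
      rayWalk arr (PySem.List.len arr) p.1 p.2 d.1 d.2
        (PySem.List.pyRange 1 (PySem.List.len arr) 1) []))

-- Source B's cover: the 'for cells in segs' scan with early return; branch on the first unblocked
-- constraint, recursing with one more wall and one less depth
def coverFind (segs : List (List (Int × Int))) (walls : List (Int × Int)) (depth : Nat) :
    List (List (Int × Int)) → Bool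
  | [] => true
  | cells :: rest =>
    if walls.any (fun w => cells.contains w) then coverFind segs walls depth rest
    else match depth with
      | 0 => false
      | d + 1 => cells.any (fun cell => coverFind segs (walls ++ [cell]) d segs)
termination_by rest => (depth, rest.length)
decreasing_by
  · exact Prod.Lex.right depth (by simp)
  · exact Prod.Lex.left _ _ (by omega)

def cover (segs : List (List (Int × Int))) (walls : List (Int × Int)) (depth : Nat) : Bool :=
  coverFind segs walls depth segs

def solution_alt (arr : List (List String)) (t_arr : List (Int × Int)) : String :=
  let N := PySem.List.len arr
  let empties := (PySem.List.pyRange 0 N 1).foldl (fun acc r =>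
    (PySem.List.pyRange 0 N 1).foldl
      (fun acc2 c => if gGet arr r c == "X" then acc2 + 1 else acc2) acc) (0 : Int)
  if empties < 3 then "NO"
  else if cover (sight_segments arr t_arr) [] 3 then "YES" else "NO"

-- ===== PRECONDITION & SPEC =====
-- Pre_ excludes ragged grids (some row shorter than the number of rows): indexing row[c] for c up to
-- len(arr)-1 then raises IndexError in both programs (A can also exit with an early "YES" before
-- reaching the short row, which B does not reproduce). On square (or wider) grids A never raises.
def Pre_solution (arr : List (List String)) (t_arr : List (Int × Int)) : Prop :=
  ∀ row ∈ arr, arr.length ≤ row.length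
instance (arr : List (List String)) (t_arr : List (Int × Int)) : Decidable (Pre_solution arr t_arr) := by
  unfold Pre_solution; infer_instance

def pvWitness_solution : List (List String) × (List (Int × Int)) :=
  ([["X", "X"], ["X", "S"]], [(0, 1)])

def Spec_solution (arr : List (List String)) (t_arr : List (Int × Int)) (out : String) : Prop := out = solution_alt arr t_arr
instance (arr : List (List String)) (t_arr : List (Int × Int)) (out : String) : Decidable (Spec_solution arr t_arr out) := by unfold Spec_solution; infer_instance

-- ===== CLAIM (what is proved, stated in full; the proofs are below) =====
def Claim_equal_solution : Prop := ∀ (arr : List (List String)) (t_arr : List (Int × Int)), Dom_solution arr t_arr → Pre_solution arr t_arr → Spec_solution arr t_arr (solution arr t_arr)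

-- ===== LEMMAS AND PROOFS =====

-- proof-side helpers: A's per-triple test phrased over a wall TRIPLE (isWall/sRay/safe), the
-- decoded flat-index cell, and the canonical list of empty cells
def isWall (walls : (Int × Int) × (Int × Int) × (Int × Int)) (r c : Int) : Bool :=
  walls.1 == (r, c) || walls.2.1 == (r, c) || walls.2.2 == (r, c)

def sRay (arr : List (List String)) (N : Int) (walls : (Int × Int) × (Int × Int) × (Int × Int))
    (dr dc nr nc : Int) : Nat → Bool
  | 0 => false
  | k + 1 =>
    let nr := nr + dr
    let nc := nc + dc
    if ¬(0 ≤ nr ∧ nr < N ∧ 0 ≤ nc ∧ nc < N) then false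
    else
      let cell := gGet arr nr nc
      if cell == "O" || isWall walls nr nc then false
      else if cell == "S" then true
      else sRay arr N walls dr dc nr nc k

def sDir (arr : List (List String)) (N : Int) (walls : (Int × Int) × (Int × Int) × (Int × Int))
    (r c : Int) : List (Int × Int) → Bool
  | [] => false
  | (dr, dc) :: ds =>
    if sRay arr N walls dr dc r c (N - 1).toNat then true
    else sDir arr N walls r c ds

def sTeach (arr : List (List String)) (N : Int) (walls : (Int × Int) × (Int × Int) × (Int × Int)) :
    List (Int × Int) → Bool
  | [] => false
  | (r, c) :: ts =>
    if sDir arr N walls r c [(1, 0), (-1, 0), (0, 1), (0, -1)] then true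
    else sTeach arr N walls ts

def safe (arr : List (List String)) (t_arr : List (Int × Int))
    (walls : (Int × Int) × (Int × Int) × (Int × Int)) : Bool :=
  !(sTeach arr (PySem.List.len arr) walls t_arr)

-- decoded cell of a flat index, A's modified grid, and A's per-triple success test
def dCell (N w : Int) : Int × Int := (PySem.Int.floordiv w N, PySem.Int.mod w N)

def modGrid (arr : List (List String)) (N w1 w2 w3 : Int) : List (List String) :=
  gSet (gSet (gSet arr (dCell N w1).1 (dCell N w1).2 "O") (dCell N w2).1 (dCell N w2).2 "O")
    (dCell N w3).1 (dCell N w3).2 "O"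

def condA (arr : List (List String)) (t_arr : List (Int × Int)) (N w1 w2 w3 : Int) : Bool :=
  (gGet arr (dCell N w1).1 (dCell N w1).2 == "X") &&
  (gGet arr (dCell N w2).1 (dCell N w2).2 == "X") &&
  (gGet arr (dCell N w3).1 (dCell N w3).2 == "X") &&
  !(get_caught (modGrid arr N w1 w2 w3) t_arr 0)

-- the canonical (nodup, row-major) list of in-grid empty cells
def empt (arr : List (List String)) : List (Int × Int) :=
  (PySem.List.pyRange 0 (PySem.List.len arr) 1).flatMap (fun r =>
    (PySem.List.pyRange 0 (PySem.List.len arr) 1).filterMap (fun c =>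
      if gGet arr r c == "X" then some (r, c) else none))

-- boolean existence form of A's search
def EAb (arr : List (List String)) (t_arr : List (Int × Int)) : Bool :=
  (PySem.List.pyRange 0 (PySem.List.len arr ^ 2) 1).any fun w1 =>
    (PySem.List.pyRange (w1 + 1) (PySem.List.len arr ^ 2) 1).any fun w2 =>
      (PySem.List.pyRange (w2 + 1) (PySem.List.len arr ^ 2) 1).any fun w3 =>
        condA arr t_arr (PySem.List.len arr) w1 w2 w3

-- "wall list W hits every constraint"
def HitsAll (W : List (Int × Int)) (segs : List (List (Int × Int))) : Prop :=
  ∀ s ∈ segs, ∃ w ∈ W, w ∈ s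

-- ---- characterization of A's search ----
theorem aLoop3_fst (arr : List (List String)) (t : List (Int × Int)) (N w1 w2 : Int)
    (l : List Int) (count : Int) :
    (aLoop3 arr t N w1 w2 l count).1 =
      if l.any (fun w3 => condA arr t N w1 w2 w3) then some "YES" else none := by
  induction l generalizing count with
  | nil => simp [aLoop3]
  | cons w3 ws ih =>
    simp only [aLoop3]
    by_cases hx1 : (gGet arr (PySem.Int.floordiv w1 N) (PySem.Int.mod w1 N) == "X") = true
    case neg =>
      rw [if_pos (Or.inl hx1), ih]
      have hc : condA arr t N w1 w2 w3 = false := by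
        simp only [Bool.not_eq_true] at hx1
        simp [condA, dCell, hx1]
      have hcond : (w3 :: ws).any (fun w3 => condA arr t N w1 w2 w3) =
          ws.any (fun w3 => condA arr t N w1 w2 w3) := by
        simp [List.any_cons, hc]
      rw [hcond]
    case pos =>
    by_cases hx2 : (gGet arr (PySem.Int.floordiv w2 N) (PySem.Int.mod w2 N) == "X") = true
    case neg =>
      rw [if_pos (Or.inr (Or.inl hx2)), ih]
      have hc : condA arr t N w1 w2 w3 = false := by
        simp only [Bool.not_eq_true] at hx2
        simp [condA, dCell, hx2]
      have hcond : (w3 :: ws).any (fun w3 => condA arr t N w1 w2 w3) =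
          ws.any (fun w3 => condA arr t N w1 w2 w3) := by
        simp [List.any_cons, hc]
      rw [hcond]
    case pos =>
    by_cases hx3 : (gGet arr (PySem.Int.floordiv w3 N) (PySem.Int.mod w3 N) == "X") = true
    case neg =>
      rw [if_pos (Or.inr (Or.inr hx3)), ih]
      have hc : condA arr t N w1 w2 w3 = false := by
        simp only [Bool.not_eq_true] at hx3
        simp [condA, dCell, hx3]
      have hcond : (w3 :: ws).any (fun w3 => condA arr t N w1 w2 w3) =
          ws.any (fun w3 => condA arr t N w1 w2 w3) := by
        simp [List.any_cons, hc]
      rw [hcond]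
    case pos =>
      rw [if_neg (by tauto :
        ¬(¬(gGet arr (PySem.Int.floordiv w1 N) (PySem.Int.mod w1 N) == "X") = true ∨
          ¬(gGet arr (PySem.Int.floordiv w2 N) (PySem.Int.mod w2 N) == "X") = true ∨
          ¬(gGet arr (PySem.Int.floordiv w3 N) (PySem.Int.mod w3 N) == "X") = true))]
      cases hgc : get_caught (modGrid arr N w1 w2 w3) t 0 with
      | false =>
        have hgc' : (!get_caught (gSet (gSet (gSet arr (PySem.Int.floordiv w1 N)
            (PySem.Int.mod w1 N) "O") (PySem.Int.floordiv w2 N) (PySem.Int.mod w2 N) "O")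
            (PySem.Int.floordiv w3 N) (PySem.Int.mod w3 N) "O") t (count + 1)) = true := by
          show (!get_caught (modGrid arr N w1 w2 w3) t 0) = true
          rw [hgc]; rfl
        rw [if_pos hgc']
        have hc : condA arr t N w1 w2 w3 = true := by
          simp only [condA, dCell]
          simp [hx1, hx2, hx3, hgc]
        have hcond : (w3 :: ws).any (fun w3 => condA arr t N w1 w2 w3) = true := by
          simp [List.any_cons, hc]
        rw [hcond]
        rfl
      | true =>
        have hgc' : ¬(!get_caught (gSet (gSet (gSet arr (PySem.Int.floordiv w1 N)
            (PySem.Int.mod w1 N) "O") (PySem.Int.floordiv w2 N) (PySem.Int.mod w2 N) "O")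
            (PySem.Int.floordiv w3 N) (PySem.Int.mod w3 N) "O") t (count + 1)) = true := by
          show ¬(!get_caught (modGrid arr N w1 w2 w3) t 0) = true
          rw [hgc]; simp
        rw [if_neg hgc', ih]
        have hc : condA arr t N w1 w2 w3 = false := by
          simp only [condA, dCell]
          simp [hgc]
        have hcond : (w3 :: ws).any (fun w3 => condA arr t N w1 w2 w3) =
            ws.any (fun w3 => condA arr t N w1 w2 w3) := by
          simp [List.any_cons, hc]
        rw [hcond]

theorem aLoop2_fst (arr : List (List String)) (t : List (Int × Int)) (N w1 : Int)
    (l : List Int) (count : Int) :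
    (aLoop2 arr t N w1 l count).1 =
      if l.any (fun w2 => (PySem.List.pyRange (w2 + 1) (N ^ 2) 1).any fun w3 =>
          condA arr t N w1 w2 w3) then some "YES" else none := by
  induction l generalizing count with
  | nil => simp [aLoop2]
  | cons w2 ws ih =>
    simp only [aLoop2]
    rcases hA : aLoop3 arr t N w1 w2 (PySem.List.pyRange (w2 + 1) (N ^ 2) 1) count with ⟨f, ct⟩
    have h3 : f = if (PySem.List.pyRange (w2 + 1) (N ^ 2) 1).any
        (fun w3 => condA arr t N w1 w2 w3) then some "YES" else none := by
      have := aLoop3_fst arr t N w1 w2 (PySem.List.pyRange (w2 + 1) (N ^ 2) 1) count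
      rw [hA] at this; exact this
    by_cases hany : (PySem.List.pyRange (w2 + 1) (N ^ 2) 1).any
        (fun w3 => condA arr t N w1 w2 w3) = true
    · rw [if_pos hany] at h3
      subst h3
      have hcond : (w2 :: ws).any (fun w2 => (PySem.List.pyRange (w2 + 1) (N ^ 2) 1).any fun w3 =>
          condA arr t N w1 w2 w3) = true := by
        simp [List.any_cons, hany]
      rw [hcond]
      rfl
    · rw [if_neg hany] at h3
      subst h3
      simp only [Bool.not_eq_true] at hany
      have hcond : (w2 :: ws).any (fun w2 => (PySem.List.pyRange (w2 + 1) (N ^ 2) 1).any fun w3 =>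
          condA arr t N w1 w2 w3) = ws.any (fun w2 => (PySem.List.pyRange (w2 + 1) (N ^ 2) 1).any fun w3 =>
          condA arr t N w1 w2 w3) := by
        simp [List.any_cons, hany]
      rw [hcond]
      show (aLoop2 arr t N w1 ws ct).1 = _
      rw [ih]

theorem aLoop1_fst (arr : List (List String)) (t : List (Int × Int)) (N : Int)
    (l : List Int) (count : Int) :
    (aLoop1 arr t N l count).1 =
      if l.any (fun w1 => (PySem.List.pyRange (w1 + 1) (N ^ 2) 1).any fun w2 =>
          (PySem.List.pyRange (w2 + 1) (N ^ 2) 1).any fun w3 =>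
            condA arr t N w1 w2 w3) then some "YES" else none := by
  induction l generalizing count with
  | nil => simp [aLoop1]
  | cons w1 ws ih =>
    simp only [aLoop1]
    rcases hA : aLoop2 arr t N w1 (PySem.List.pyRange (w1 + 1) (N ^ 2) 1) count with ⟨f, ct⟩
    have h3 : f = if (PySem.List.pyRange (w1 + 1) (N ^ 2) 1).any
        (fun w2 => (PySem.List.pyRange (w2 + 1) (N ^ 2) 1).any fun w3 =>
          condA arr t N w1 w2 w3) then some "YES" else none := by
      have := aLoop2_fst arr t N w1 (PySem.List.pyRange (w1 + 1) (N ^ 2) 1) count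
      rw [hA] at this; exact this
    by_cases hany : (PySem.List.pyRange (w1 + 1) (N ^ 2) 1).any
        (fun w2 => (PySem.List.pyRange (w2 + 1) (N ^ 2) 1).any fun w3 =>
          condA arr t N w1 w2 w3) = true
    · rw [if_pos hany] at h3
      subst h3
      have hcond : (w1 :: ws).any (fun w1 => (PySem.List.pyRange (w1 + 1) (N ^ 2) 1).any fun w2 =>
          (PySem.List.pyRange (w2 + 1) (N ^ 2) 1).any fun w3 => condA arr t N w1 w2 w3) = true := by
        simp [List.any_cons, hany]
      rw [hcond]
      rfl
    · rw [if_neg hany] at h3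
      subst h3
      simp only [Bool.not_eq_true] at hany
      have hcond : (w1 :: ws).any (fun w1 => (PySem.List.pyRange (w1 + 1) (N ^ 2) 1).any fun w2 =>
          (PySem.List.pyRange (w2 + 1) (N ^ 2) 1).any fun w3 => condA arr t N w1 w2 w3) =
          ws.any (fun w1 => (PySem.List.pyRange (w1 + 1) (N ^ 2) 1).any fun w2 =>
          (PySem.List.pyRange (w2 + 1) (N ^ 2) 1).any fun w3 => condA arr t N w1 w2 w3) := by
        simp [List.any_cons, hany]
      rw [hcond]
      show (aLoop1 arr t N ws ct).1 = _
      rw [ih]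

theorem solution_eq (arr : List (List String)) (t : List (Int × Int)) :
    solution arr t = if EAb arr t then "YES" else "NO" := by
  have e0 : solution arr t = (match (aLoop1 arr t (PySem.List.len arr)
      (PySem.List.pyRange 0 (PySem.List.len arr ^ 2) 1) 0).1 with
    | some s => s
    | none => "NO") := rfl
  rw [e0, aLoop1_fst]
  have e1 : ((PySem.List.pyRange 0 (PySem.List.len arr ^ 2) 1).any fun w1 =>
      (PySem.List.pyRange (w1 + 1) (PySem.List.len arr ^ 2) 1).any fun w2 =>
        (PySem.List.pyRange (w2 + 1) (PySem.List.len arr ^ 2) 1).any fun w3 =>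
          condA arr t (PySem.List.len arr) w1 w2 w3) = EAb arr t := rfl
  rw [e1]
  cases EAb arr t
  · rfl
  · rfl

-- ---- grid read/write lemmas ----
theorem any_or4 (l : List (Int × Int)) (f1 f2 f3 f4 : (Int × Int) → Bool) :
    l.any (fun p => f1 p || f2 p || f3 p || f4 p) =
      (l.any f1 || l.any f2 || l.any f3 || l.any f4) := by
  induction l with
  | nil => rfl
  | cons q qs ih =>
    simp only [List.any_cons, ih]
    cases f1 q <;> cases f2 q <;> cases f3 q <;> cases f4 q <;> simp

theorem length_gSet (g : List (List String)) (r c : Int) (v : String) :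
    (gSet g r c v).length = g.length := by
  simp [gSet]

theorem gGet_eq (g : List (List String)) (r c : Int) (hr : 0 ≤ r) (hrN : r.toNat < g.length)
    (hc : 0 ≤ c) : gGet g r c = (g[r.toNat][c.toNat]?).getD "" := by
  unfold gGet
  rw [PySem.List.pyGet?_of_nonneg _ hr, List.getElem?_eq_getElem hrN]
  simp only [Option.getD_some]
  rw [PySem.List.pyGet?_of_nonneg _ hc]

theorem gSet_row (g : List (List String)) (r c : Int) (v : String) (hr : 0 ≤ r)
    (hrN : r.toNat < g.length) :
    gSet g r c v = g.set r.toNat (g[r.toNat].set c.toNat v) := by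
  unfold gSet
  rw [PySem.List.pyGet?_of_nonneg _ hr, List.getElem?_eq_getElem hrN]
  simp only [Option.getD_some]

theorem rows_gSet (g : List (List String)) (r c : Int) (v : String)
    (hr : 0 ≤ r) (hrN : r < (g.length : Int))
    (hP : ∀ row ∈ g, g.length ≤ row.length) :
    ∀ row ∈ gSet g r c v, (gSet g r c v).length ≤ row.length := by
  intro row hrow
  rw [length_gSet]
  have hrnat : r.toNat < g.length := by omega
  rw [gSet_row g r c v hr hrnat] at hrow
  rcases List.mem_or_eq_of_mem_set hrow with h | h
  · exact hP _ h
  · subst h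
    rw [List.length_set]
    exact hP _ (List.getElem_mem _)

theorem gGet_gSet (g : List (List String)) (v : String) (r c r' c' : Int)
    (hP : ∀ row ∈ g, g.length ≤ row.length)
    (hr : 0 ≤ r) (hrN : r < (g.length : Int)) (hc : 0 ≤ c) (hcN : c < (g.length : Int))
    (hr' : 0 ≤ r') (hrN' : r' < (g.length : Int)) (hc' : 0 ≤ c') (hcN' : c' < (g.length : Int)) :
    gGet (gSet g r c v) r' c' = if r = r' ∧ c = c' then v else gGet g r' c' := by
  have hrnat : r.toNat < g.length := by omega
  have hrnat' : r'.toNat < g.length := by omega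
  have hrow : g.length ≤ g[r.toNat].length := hP _ (List.getElem_mem _)
  have hrow' : g.length ≤ g[r'.toNat].length := hP _ (List.getElem_mem _)
  rw [gSet_row g r c v hr hrnat]
  rw [gGet_eq _ r' c' hr' (by rw [List.length_set]; omega) hc',
    gGet_eq g r' c' hr' hrnat' hc']
  rw [List.getElem_set]
  by_cases hrr : r.toNat = r'.toNat
  · rw [if_pos hrr, List.getElem?_set]
    have hre : r = r' := by omega
    by_cases hcc : c.toNat = c'.toNat
    · have hce : c = c' := by omega
      rw [if_pos hcc, if_pos (by omega : c.toNat < g[r.toNat].length),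
        if_pos ⟨hre, hce⟩]
      simp
    · rw [if_neg hcc, if_neg (by rintro ⟨-, h2⟩; subst h2; omega)]
      simp only [hrr]
  · rw [if_neg hrr, if_neg (by rintro ⟨h1, -⟩; subst h1; omega)]

theorem gGet_set3 (arr : List (List String)) (p1 p2 p3 : Int × Int) (nr nc : Int)
    (hP : ∀ row ∈ arr, arr.length ≤ row.length)
    (h1 : 0 ≤ p1.1 ∧ p1.1 < (arr.length : Int) ∧ 0 ≤ p1.2 ∧ p1.2 < (arr.length : Int))
    (h2 : 0 ≤ p2.1 ∧ p2.1 < (arr.length : Int) ∧ 0 ≤ p2.2 ∧ p2.2 < (arr.length : Int))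
    (h3 : 0 ≤ p3.1 ∧ p3.1 < (arr.length : Int) ∧ 0 ≤ p3.2 ∧ p3.2 < (arr.length : Int))
    (hnr : 0 ≤ nr ∧ nr < (arr.length : Int)) (hnc : 0 ≤ nc ∧ nc < (arr.length : Int)) :
    gGet (gSet (gSet (gSet arr p1.1 p1.2 "O") p2.1 p2.2 "O") p3.1 p3.2 "O") nr nc =
      if isWall (p1, p2, p3) nr nc then "O" else gGet arr nr nc := by
  have hl1 : (gSet arr p1.1 p1.2 "O").length = arr.length := length_gSet _ _ _ _
  have hl2 : (gSet (gSet arr p1.1 p1.2 "O") p2.1 p2.2 "O").length = arr.length := by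
    rw [length_gSet, hl1]
  have hP1 : ∀ row ∈ gSet arr p1.1 p1.2 "O",
      (gSet arr p1.1 p1.2 "O").length ≤ row.length :=
    rows_gSet arr p1.1 p1.2 "O" h1.1 h1.2.1 hP
  have hP2 : ∀ row ∈ gSet (gSet arr p1.1 p1.2 "O") p2.1 p2.2 "O",
      (gSet (gSet arr p1.1 p1.2 "O") p2.1 p2.2 "O").length ≤ row.length := by
    apply rows_gSet _ _ _ _ h2.1 _ hP1
    rw [hl1]; exact h2.2.1
  rw [gGet_gSet _ "O" p3.1 p3.2 nr nc hP2 h3.1 (by rw [hl2]; exact h3.2.1)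
    h3.2.2.1 (by rw [hl2]; exact h3.2.2.2) hnr.1
    (by rw [hl2]; exact hnr.2) hnc.1 (by rw [hl2]; exact hnc.2)]
  rw [gGet_gSet _ "O" p2.1 p2.2 nr nc hP1 h2.1 (by rw [hl1]; exact h2.2.1)
    h2.2.2.1 (by rw [hl1]; exact h2.2.2.2) hnr.1
    (by rw [hl1]; exact hnr.2) hnc.1 (by rw [hl1]; exact hnc.2)]
  rw [gGet_gSet arr "O" p1.1 p1.2 nr nc hP h1.1 h1.2.1 h1.2.2.1 h1.2.2.2 hnr.1 hnr.2 hnc.1 hnc.2]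
  simp only [isWall, Bool.or_eq_true, beq_iff_eq, Prod.ext_iff]
  split_ifs <;> simp_all <;> tauto

-- ---- get_caught on the modified grid equals the triple test 'safe' ----
theorem gcRay_fst_indep (arr : List (List String)) (N r c dr dc : Int) :
    ∀ (l : List Int) (ac ac' : List (List String)),
      (gcRay arr N r c dr dc l ac).1 = (gcRay arr N r c dr dc l ac').1 := by
  intro l
  induction l with
  | nil => intro ac ac'; rfl
  | cons i is ih =>
    intro ac ac'
    simp only [gcRay]
    split_ifs <;> first | rfl | apply ih

theorem gcTeach_fst (arr : List (List String)) (N dr dc : Int) :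
    ∀ (ts : List (Int × Int)) (ac : List (List String)),
      (gcTeach arr N dr dc ts ac).1 =
        ts.any (fun p => (gcRay arr N p.1 p.2 dr dc (PySem.List.pyRange 1 N 1) arr).1) := by
  intro ts
  induction ts with
  | nil => intro ac; rfl
  | cons p ts ih =>
    intro ac
    rcases p with ⟨r, c⟩
    simp only [gcTeach, List.any_cons]
    rcases hR : gcRay arr N r c dr dc (PySem.List.pyRange 1 N 1) ac with ⟨b, ac2⟩
    have hb : (gcRay arr N r c dr dc (PySem.List.pyRange 1 N 1) arr).1 = b := by
      rw [gcRay_fst_indep arr N r c dr dc _ arr ac, hR]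
    cases b with
    | true =>
      show true = _
      rw [hb]
      rfl
    | false =>
      show (gcTeach arr N dr dc ts ac2).1 = _
      rw [ih ac2, hb, Bool.false_or]

theorem gcDirs_fst (arr : List (List String)) (t : List (Int × Int)) (N : Int) :
    ∀ (ds : List Int) (ac : List (List String)),
      (gcDirs arr t N ds ac).1 =
        ds.any (fun di => t.any (fun p => (gcRay arr N p.1 p.2
          ((PySem.List.pyGet? ([1, -1, 0, 0] : List Int) di).getD 0)
          ((PySem.List.pyGet? ([0, 0, 1, -1] : List Int) di).getD 0)
          (PySem.List.pyRange 1 N 1) arr).1)) := by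
  intro ds
  induction ds with
  | nil => intro ac; rfl
  | cons di ds ih =>
    intro ac
    simp only [gcDirs, List.any_cons]
    rcases hT : gcTeach arr N ((PySem.List.pyGet? ([1, -1, 0, 0] : List Int) di).getD 0)
      ((PySem.List.pyGet? ([0, 0, 1, -1] : List Int) di).getD 0) t ac with ⟨b, ac2⟩
    have hb : b = t.any (fun p => (gcRay arr N p.1 p.2
        ((PySem.List.pyGet? ([1, -1, 0, 0] : List Int) di).getD 0)
        ((PySem.List.pyGet? ([0, 0, 1, -1] : List Int) di).getD 0)
        (PySem.List.pyRange 1 N 1) arr).1) := by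
      have := gcTeach_fst arr N ((PySem.List.pyGet? ([1, -1, 0, 0] : List Int) di).getD 0)
        ((PySem.List.pyGet? ([0, 0, 1, -1] : List Int) di).getD 0) t ac
      rw [hT] at this
      exact this
    cases b with
    | true =>
      show true = _
      rw [← hb]
      rfl
    | false =>
      show (gcDirs arr t N ds ac2).1 = _
      rw [ih ac2, ← hb, Bool.false_or]

theorem sDir_any (arr : List (List String)) (N : Int)
    (walls : (Int × Int) × (Int × Int) × (Int × Int)) (r c : Int) :
    ∀ dl : List (Int × Int), sDir arr N walls r c dl =
      dl.any (fun d => sRay arr N walls d.1 d.2 r c (N - 1).toNat) := by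
  intro dl
  induction dl with
  | nil => rfl
  | cons d ds ih =>
    rcases d with ⟨dr, dc⟩
    simp only [sDir, List.any_cons]
    by_cases h : sRay arr N walls dr dc r c (N - 1).toNat = true
    · rw [if_pos h, h, Bool.true_or]
    · rw [if_neg h, ih]
      simp only [Bool.not_eq_true] at h
      rw [h, Bool.false_or]

theorem sTeach_any (arr : List (List String)) (N : Int)
    (walls : (Int × Int) × (Int × Int) × (Int × Int)) :
    ∀ ts : List (Int × Int), sTeach arr N walls ts =
      ts.any (fun p => sDir arr N walls p.1 p.2 [(1, 0), (-1, 0), (0, 1), (0, -1)]) := by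
  intro ts
  induction ts with
  | nil => rfl
  | cons p ts ih =>
    rcases p with ⟨r, c⟩
    simp only [sTeach, List.any_cons]
    by_cases h : sDir arr N walls r c [(1, 0), (-1, 0), (0, 1), (0, -1)] = true
    · rw [if_pos h, h, Bool.true_or]
    · rw [if_neg h, ih]
      simp only [Bool.not_eq_true] at h
      rw [h, Bool.false_or]

theorem rayEq (garr arr : List (List String)) (N : Int)
    (walls : (Int × Int) × (Int × Int) × (Int × Int)) (r c dr dc : Int)
    (H : ∀ nr nc : Int, 0 ≤ nr → nr < N → 0 ≤ nc → nc < N →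
      gGet garr nr nc = if isWall walls nr nc then "O" else gGet arr nr nc) :
    ∀ (k : Nat) (i0 nr0 nc0 : Int), i0 + k = N → nr0 = r + dr * (i0 - 1) →
      nc0 = c + dc * (i0 - 1) → ∀ ac,
      (gcRay garr N r c dr dc (PySem.List.pyRange i0 N 1) ac).1 =
        sRay arr N walls dr dc nr0 nc0 k := by
  intro k
  induction k with
  | zero =>
    intro i0 nr0 nc0 hiN _ _ ac
    rw [PySem.List.pyRange_one_eq_nil (by omega)]
    rfl
  | succ k ih =>
    intro i0 nr0 nc0 hiN hnr hnc ac
    have hlt : i0 < N := by omega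
    rw [PySem.List.pyRange_one_cons hlt]
    simp only [gcRay, sRay]
    have e1 : nr0 + dr = r + dr * i0 := by rw [hnr]; ring
    have e2 : nc0 + dc = c + dc * i0 := by rw [hnc]; ring
    rw [e1, e2]
    by_cases hin : 0 ≤ r + dr * i0 ∧ r + dr * i0 < N ∧ 0 ≤ c + dc * i0 ∧ c + dc * i0 < N
    · rw [if_pos hin, if_neg (by tauto :
        ¬¬(0 ≤ r + dr * i0 ∧ r + dr * i0 < N ∧ 0 ≤ c + dc * i0 ∧ c + dc * i0 < N))]
      rw [H _ _ hin.1 hin.2.1 hin.2.2.1 hin.2.2.2]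
      by_cases hw : isWall walls (r + dr * i0) (c + dc * i0) = true
      · rw [if_pos hw]
        simp [hw]
      · have hwf : isWall walls (r + dr * i0) (c + dc * i0) = false := by
          simpa using hw
        simp only [hwf, Bool.false_eq_true, if_false, Bool.or_false]
        by_cases hO : (gGet arr (r + dr * i0) (c + dc * i0) == "O") = true
        · rw [if_pos hO, if_pos hO]
        · rw [if_neg hO, if_neg hO]
          by_cases hS : (gGet arr (r + dr * i0) (c + dc * i0) == "S") = true
          · rw [if_pos hS, if_pos hS]
          · rw [if_neg hS, if_neg hS]
            exact ih (i0 + 1) _ _ (by omega) (by ring) (by ring) _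
    · rw [if_neg hin, if_pos hin]

theorem caught_eq_safe (arr : List (List String)) (t : List (Int × Int)) (p1 p2 p3 : Int × Int)
    (hP : ∀ row ∈ arr, arr.length ≤ row.length)
    (h1 : 0 ≤ p1.1 ∧ p1.1 < (arr.length : Int) ∧ 0 ≤ p1.2 ∧ p1.2 < (arr.length : Int))
    (h2 : 0 ≤ p2.1 ∧ p2.1 < (arr.length : Int) ∧ 0 ≤ p2.2 ∧ p2.2 < (arr.length : Int))
    (h3 : 0 ≤ p3.1 ∧ p3.1 < (arr.length : Int) ∧ 0 ≤ p3.2 ∧ p3.2 < (arr.length : Int)) :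
    get_caught (gSet (gSet (gSet arr p1.1 p1.2 "O") p2.1 p2.2 "O") p3.1 p3.2 "O") t 0 =
      !safe arr t (p1, p2, p3) := by
  have hN1 : (1 : Int) ≤ (arr.length : Int) := by omega
  have H : ∀ nr nc : Int, 0 ≤ nr → nr < (arr.length : Int) → 0 ≤ nc → nc < (arr.length : Int) →
      gGet (gSet (gSet (gSet arr p1.1 p1.2 "O") p2.1 p2.2 "O") p3.1 p3.2 "O") nr nc =
        if isWall (p1, p2, p3) nr nc then "O" else gGet arr nr nc := by
    intro nr nc a b cc d
    exact gGet_set3 arr p1 p2 p3 nr nc hP h1 h2 h3 ⟨a, b⟩ ⟨cc, d⟩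
  have e0 : get_caught (gSet (gSet (gSet arr p1.1 p1.2 "O") p2.1 p2.2 "O") p3.1 p3.2 "O") t 0 =
      (gcDirs (gSet (gSet (gSet arr p1.1 p1.2 "O") p2.1 p2.2 "O") p3.1 p3.2 "O") t
        (PySem.List.len (gSet (gSet (gSet arr p1.1 p1.2 "O") p2.1 p2.2 "O") p3.1 p3.2 "O"))
        (PySem.List.pyRange 0 4 1)
        (gSet (gSet (gSet arr p1.1 p1.2 "O") p2.1 p2.2 "O") p3.1 p3.2 "O")).1 := rfl
  have eL : PySem.List.len (gSet (gSet (gSet arr p1.1 p1.2 "O") p2.1 p2.2 "O") p3.1 p3.2 "O") =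
      (arr.length : Int) := by
    simp [PySem.List.len_eq, length_gSet]
  have e1 : safe arr t (p1, p2, p3) =
      !(sTeach arr (arr.length : Int) (p1, p2, p3) t) := by
    unfold safe
    rw [PySem.List.len_eq]
  rw [e0, eL, gcDirs_fst, e1, Bool.not_not, sTeach_any]
  have hrange : PySem.List.pyRange 0 4 1 = [0, 1, 2, 3] := by decide
  rw [hrange]
  have d0r : ((PySem.List.pyGet? ([1, -1, 0, 0] : List Int) 0).getD 0) = 1 := by decide
  have d0c : ((PySem.List.pyGet? ([0, 0, 1, -1] : List Int) 0).getD 0) = 0 := by decide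
  have d1r : ((PySem.List.pyGet? ([1, -1, 0, 0] : List Int) 1).getD 0) = -1 := by decide
  have d1c : ((PySem.List.pyGet? ([0, 0, 1, -1] : List Int) 1).getD 0) = 0 := by decide
  have d2r : ((PySem.List.pyGet? ([1, -1, 0, 0] : List Int) 2).getD 0) = 0 := by decide
  have d2c : ((PySem.List.pyGet? ([0, 0, 1, -1] : List Int) 2).getD 0) = 1 := by decide
  have d3r : ((PySem.List.pyGet? ([1, -1, 0, 0] : List Int) 3).getD 0) = 0 := by decide
  have d3c : ((PySem.List.pyGet? ([0, 0, 1, -1] : List Int) 3).getD 0) = -1 := by decide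
  simp only [List.any_cons, List.any_nil, Bool.or_false, d0r, d0c, d1r, d1c, d2r, d2c, d3r, d3c]
  have hray : ∀ (dr dc : Int) (p : Int × Int),
      (gcRay (gSet (gSet (gSet arr p1.1 p1.2 "O") p2.1 p2.2 "O") p3.1 p3.2 "O")
        (arr.length : Int) p.1 p.2 dr dc
        (PySem.List.pyRange 1 (arr.length : Int) 1)
        (gSet (gSet (gSet arr p1.1 p1.2 "O") p2.1 p2.2 "O") p3.1 p3.2 "O")).1 =
      sRay arr (arr.length : Int) (p1, p2, p3) dr dc p.1 p.2 ((arr.length : Int) - 1).toNat := by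
    intro dr dc p
    exact rayEq _ arr (arr.length : Int) (p1, p2, p3) p.1 p.2 dr dc H
      ((arr.length : Int) - 1).toNat 1 p.1 p.2 (by omega) (by ring) (by ring) _
  simp only [hray]
  have hsd : ∀ p : Int × Int, sDir arr (arr.length : Int) (p1, p2, p3) p.1 p.2
      [(1, 0), (-1, 0), (0, 1), (0, -1)] =
        (sRay arr (arr.length : Int) (p1, p2, p3) 1 0 p.1 p.2 ((arr.length : Int) - 1).toNat ||
         sRay arr (arr.length : Int) (p1, p2, p3) (-1) 0 p.1 p.2 ((arr.length : Int) - 1).toNat ||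
         sRay arr (arr.length : Int) (p1, p2, p3) 0 1 p.1 p.2 ((arr.length : Int) - 1).toNat ||
         sRay arr (arr.length : Int) (p1, p2, p3) 0 (-1) p.1 p.2 ((arr.length : Int) - 1).toNat) := by
    intro p
    rw [sDir_any]
    simp [List.any_cons, Bool.or_assoc]
  simp only [hsd]
  rw [any_or4]
  simp [Bool.or_assoc]

-- ---- decoding flat indices ----
theorem dCell_decomp (N k j : Int) (hN : 0 < N) (hj0 : 0 ≤ j) (hjN : j < N) :
    dCell N (k * N + j) = (k, j) := by
  unfold dCell
  have hdiv : PySem.Int.floordiv (k * N + j) N = k :=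
    (PySem.Int.floordiv_eq_iff_of_pos hN).mpr ⟨by nlinarith, by nlinarith⟩
  have hmod : PySem.Int.mod (k * N + j) N = j := by
    have hh := PySem.Int.floordiv_mul_add_mod (k * N + j) N
    rw [hdiv] at hh
    linarith
  rw [hdiv, hmod]

theorem dCell_bounds (N w : Int) (hN : 0 < N) (h0 : 0 ≤ w) (hw : w < N ^ 2) :
    0 ≤ (dCell N w).1 ∧ (dCell N w).1 < N ∧ 0 ≤ (dCell N w).2 ∧ (dCell N w).2 < N := by
  have hw' : w < N * N := by nlinarith [sq_nonneg N]
  refine ⟨?_, ?_, PySem.Int.mod_nonneg w hN, PySem.Int.mod_lt w hN⟩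
  · exact (PySem.Int.le_floordiv_iff_mul_le hN).mpr (by linarith)
  · exact (PySem.Int.floordiv_lt_iff_lt_mul hN).mpr (by linarith)

theorem dCell_inj (N w1 w2 : Int) (h : dCell N w1 = dCell N w2) : w1 = w2 := by
  have h1 := PySem.Int.floordiv_mul_add_mod w1 N
  have h2 := PySem.Int.floordiv_mul_add_mod w2 N
  simp only [dCell, Prod.ext_iff] at h
  rw [← h1, ← h2, h.1, h.2]

theorem cells_decomp (N : Int) (hN : 0 ≤ N) :
    (PySem.List.pyRange 0 (N ^ 2) 1).map (dCell N) =
      (PySem.List.pyRange 0 N 1).flatMap (fun r =>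
        (PySem.List.pyRange 0 N 1).map (fun c => (r, c))) := by
  rcases eq_or_lt_of_le hN with h0 | hpos
  · rw [← h0]
    norm_num [PySem.List.pyRange_one_eq_nil]
  · have key : ∀ k : Nat, (k : Int) ≤ N →
        (PySem.List.pyRange 0 ((k : Int) * N) 1).map (dCell N) =
          (PySem.List.pyRange 0 (k : Int) 1).flatMap (fun r =>
            (PySem.List.pyRange 0 N 1).map (fun c => (r, c))) := by
      intro k
      induction k with
      | zero => intro _; simp [PySem.List.pyRange_one_eq_nil]
      | succ k ih =>
        intro hk
        have hk' : (k : Int) ≤ N := by push_cast at hk ⊢; omega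
        have hc0 : (((k + 1 : Nat)) : Int) = (k : Int) + 1 := by push_cast; ring
        rw [hc0]
        have hsplit : PySem.List.pyRange 0 (((k : Int) + 1) * N) 1 =
            PySem.List.pyRange 0 ((k : Int) * N) 1 ++
              PySem.List.pyRange ((k : Int) * N) (((k : Int) + 1) * N) 1 :=
          PySem.List.pyRange_one_append _ _ _ (by positivity) (by nlinarith)
        rw [hsplit, List.map_append, ih hk']
        have hrows : PySem.List.pyRange 0 ((k : Int) + 1) 1 =
            PySem.List.pyRange 0 (k : Int) 1 ++ [(k : Int)] :=
          PySem.List.pyRange_one_succ_right (by positivity)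
        rw [hrows, List.flatMap_append]
        congr 1
        simp only [List.flatMap_cons, List.flatMap_nil, List.append_nil]
        rw [PySem.List.pyRange_one ((k : Int) * N) (((k : Int) + 1) * N),
          PySem.List.pyRange_one 0 N]
        have hlen : ((k : Int) + 1) * N - (k : Int) * N = N - 0 := by ring
        rw [hlen, List.map_map, List.map_map]
        apply List.map_congr_left
        intro j hj
        simp only [List.mem_range] at hj
        have hjN : (j : Int) < N := by
          have : (j : Int) < ((N - 0).toNat : Int) := by exact_mod_cast hj
          omega
        simp only [Function.comp_apply]
        rw [dCell_decomp N (k : Int) (j : Int) hpos (by positivity) hjN]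
        norm_num
    have hNt : ((N.toNat : Nat) : Int) = N := Int.toNat_of_nonneg hN
    have hkey := key N.toNat (by rw [hNt])
    rw [hNt] at hkey
    rw [show N ^ 2 = N * N from sq N]
    exact hkey

theorem filterMap_if_eq_filter_map (R : List Int) (f : Int → Int × Int)
    (q : Int × Int → Bool) :
    R.filterMap (fun c => if q (f c) then some (f c) else none) = (R.map f).filter q := by
  induction R with
  | nil => rfl
  | cons c cs ih =>
    simp only [List.filterMap_cons, List.map_cons, List.filter_cons]
    by_cases h : q (f c) = true
    · rw [if_pos h, if_pos h, ih]
    · rw [if_neg h, if_neg h, ih]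

theorem empt_eq (arr : List (List String)) :
    empt arr = ((PySem.List.pyRange 0 ((arr.length : Int) ^ 2) 1).map
        (dCell (arr.length : Int))).filter (fun p => gGet arr p.1 p.2 == "X") := by
  unfold empt
  rw [PySem.List.len_eq]
  rw [cells_decomp (arr.length : Int) (by positivity), List.filter_flatMap]
  congr 1
  funext r
  exact filterMap_if_eq_filter_map (PySem.List.pyRange 0 (arr.length : Int) 1)
    (fun c => (r, c)) (fun p => gGet arr p.1 p.2 == "X")

theorem mem_empt (arr : List (List String)) (p : Int × Int) (hp : p ∈ empt arr) :
    (gGet arr p.1 p.2 == "X") = true ∧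
      0 ≤ p.1 ∧ p.1 < (arr.length : Int) ∧ 0 ≤ p.2 ∧ p.2 < (arr.length : Int) := by
  rw [empt_eq] at hp
  have hX := (List.mem_filter.mp hp).2
  have hmem := (List.mem_filter.mp hp).1
  rcases List.mem_map.mp hmem with ⟨w, hw, hd⟩
  rw [PySem.List.mem_pyRange_one] at hw
  have hN : (0 : Int) < (arr.length : Int) := by
    rcases Nat.eq_zero_or_pos arr.length with h | h
    · exfalso; rw [h] at hw; norm_num at hw; omega
    · exact_mod_cast h
  have hb := dCell_bounds (arr.length : Int) w hN hw.1 hw.2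
  rw [hd] at hb
  exact ⟨hX, hb⟩

theorem mem_empt_intro (arr : List (List String)) (p : Int × Int)
    (hr : 0 ≤ p.1 ∧ p.1 < (arr.length : Int)) (hc : 0 ≤ p.2 ∧ p.2 < (arr.length : Int))
    (hX : (gGet arr p.1 p.2 == "X") = true) : p ∈ empt arr := by
  unfold empt
  rw [PySem.List.len_eq]
  rw [List.mem_flatMap]
  refine ⟨p.1, ?_, ?_⟩
  · rw [PySem.List.mem_pyRange_one]; exact hr
  · rw [List.mem_filterMap]
    exact ⟨p.2, by rw [PySem.List.mem_pyRange_one]; exact hc, by rw [if_pos hX]⟩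

theorem nodup_empt (arr : List (List String)) : (empt arr).Nodup := by
  rw [empt_eq]
  apply List.Nodup.filter
  apply List.Nodup.map_on
  · intro x _ y _ h
    exact dCell_inj _ _ _ h
  · exact PySem.List.nodup_pyRange_one _ _

theorem sublist_triple_pyRange (lo hi w1 w2 w3 : Int) :
    List.Sublist [w1, w2, w3] (PySem.List.pyRange lo hi 1) ↔
      lo ≤ w1 ∧ w1 < w2 ∧ w2 < w3 ∧ w3 < hi := by
  constructor
  · intro h
    have hp := List.Pairwise.sublist h (PySem.List.pairwise_lt_pyRange_one lo hi)
    have m1 := List.Sublist.mem (show w1 ∈ [w1, w2, w3] by simp) h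
    have m3 := List.Sublist.mem (show w3 ∈ [w1, w2, w3] by simp) h
    rw [PySem.List.mem_pyRange_one] at m1 m3
    have h12 : w1 < w2 := (List.pairwise_cons.mp hp).1 w2 (by simp)
    have h23 : w2 < w3 :=
      (List.pairwise_cons.mp (List.pairwise_cons.mp hp).2).1 w3 (by simp)
    exact ⟨m1.1, h12, h23, m3.2⟩
  · rintro ⟨h1, h2, h3, h4⟩
    have e : PySem.List.pyRange lo hi 1 = PySem.List.pyRange lo w1 1 ++
        (PySem.List.pyRange w1 w2 1 ++ (PySem.List.pyRange w2 w3 1 ++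
          PySem.List.pyRange w3 hi 1)) := by
      rw [PySem.List.pyRange_one_append lo w1 hi (by omega) (by omega),
        PySem.List.pyRange_one_append w1 w2 hi (by omega) (by omega),
        PySem.List.pyRange_one_append w2 w3 hi (by omega) (by omega)]
    rw [e]
    have s1 : List.Sublist [w1] (PySem.List.pyRange w1 w2 1) := by
      rw [PySem.List.pyRange_one_cons (by omega)]
      exact List.Sublist.cons₂ w1 (List.nil_sublist _)
    have s2 : List.Sublist [w2] (PySem.List.pyRange w2 w3 1) := by
      rw [PySem.List.pyRange_one_cons (by omega)]
      exact List.Sublist.cons₂ w2 (List.nil_sublist _)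
    have s3 : List.Sublist [w3] (PySem.List.pyRange w3 hi 1) := by
      rw [PySem.List.pyRange_one_cons (by omega)]
      exact List.Sublist.cons₂ w3 (List.nil_sublist _)
    have : ([w1, w2, w3] : List Int) = [] ++ ([w1] ++ ([w2] ++ [w3])) := rfl
    rw [this]
    exact List.Sublist.append (List.nil_sublist _)
      (List.Sublist.append s1 (List.Sublist.append s2 s3))

-- ---- A's search = existence of a good triple of distinct empty cells ----
theorem EAb_iff (arr : List (List String)) (t : List (Int × Int))
    (hPre : ∀ row ∈ arr, arr.length ≤ row.length) :
    EAb arr t = true ↔ ∃ q1 q2 q3 : Int × Int,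
      List.Sublist [q1, q2, q3] (empt arr) ∧ safe arr t (q1, q2, q3) = true := by
  simp only [EAb, List.any_eq_true, PySem.List.mem_pyRange_one, PySem.List.len_eq]
  constructor
  · rintro ⟨w1, ⟨hw10, hw1⟩, w2, ⟨hw21, hw2⟩, w3, ⟨hw32, hw3⟩, hcond⟩
    have hN : (0 : Int) < (arr.length : Int) := by
      rcases Nat.eq_zero_or_pos arr.length with h | h
      · exfalso
        rw [h] at hw3
        norm_num at hw3
        omega
      · exact_mod_cast h
    have hb1 := dCell_bounds (arr.length : Int) w1 hN hw10 hw1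
    have hb2 := dCell_bounds (arr.length : Int) w2 hN (by omega) hw2
    have hb3 := dCell_bounds (arr.length : Int) w3 hN (by omega) hw3
    simp only [condA, Bool.and_eq_true] at hcond
    obtain ⟨⟨⟨hX1, hX2⟩, hX3⟩, hgc⟩ := hcond
    have hgc' : get_caught (modGrid arr (arr.length : Int) w1 w2 w3) t 0 = false := by
      rw [Bool.not_eq_true'] at hgc
      exact hgc
    have hsafe : safe arr t (dCell (arr.length : Int) w1, dCell (arr.length : Int) w2,
        dCell (arr.length : Int) w3) = true := by
      have hcs : get_caught (modGrid arr (arr.length : Int) w1 w2 w3) t 0 =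
          !safe arr t (dCell (arr.length : Int) w1, dCell (arr.length : Int) w2,
            dCell (arr.length : Int) w3) :=
        caught_eq_safe arr t (dCell (arr.length : Int) w1) (dCell (arr.length : Int) w2)
          (dCell (arr.length : Int) w3) hPre hb1 hb2 hb3
      rw [hgc'] at hcs
      simpa using hcs.symm
    have h0 : List.Sublist [w1, w2, w3] (PySem.List.pyRange 0 ((arr.length : Int) ^ 2) 1) :=
      (sublist_triple_pyRange _ _ _ _ _).mpr ⟨hw10, by omega, by omega, hw3⟩
    have h1 := List.Sublist.map (dCell (arr.length : Int)) h0
    simp only [List.map_cons, List.map_nil] at h1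
    have h2 := List.Sublist.filter (fun p => gGet arr p.1 p.2 == "X") h1
    have h3 : List.filter (fun p => gGet arr p.1 p.2 == "X")
        [dCell (arr.length : Int) w1, dCell (arr.length : Int) w2, dCell (arr.length : Int) w3] =
        [dCell (arr.length : Int) w1, dCell (arr.length : Int) w2, dCell (arr.length : Int) w3] := by
      simp [hX1, hX2, hX3]
    rw [h3] at h2
    rw [← empt_eq] at h2
    exact ⟨_, _, _, h2, hsafe⟩
  · rintro ⟨q1, q2, q3, hsub, hsafe⟩
    have hq1 := mem_empt arr q1 (hsub.mem (by simp))
    have hq2 := mem_empt arr q2 (hsub.mem (by simp))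
    have hq3 := mem_empt arr q3 (hsub.mem (by simp))
    have hN : (0 : Int) < (arr.length : Int) := by omega
    have hsub2 : List.Sublist [q1, q2, q3]
        ((PySem.List.pyRange 0 ((arr.length : Int) ^ 2) 1).map (dCell (arr.length : Int))) := by
      refine hsub.trans ?_
      rw [empt_eq]
      exact List.filter_sublist
    obtain ⟨l', hl'sub, hl'map⟩ := List.sublist_map_iff.mp hsub2
    rcases l' with _ | ⟨w1, _ | ⟨w2, _ | ⟨w3, _ | _⟩⟩⟩ <;> simp at hl'map
    obtain ⟨he1, he2, he3⟩ := hl'map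
    have hw := (sublist_triple_pyRange _ _ _ _ _).mp hl'sub
    have hbds1 := dCell_bounds (arr.length : Int) w1 hN hw.1 (by omega)
    have hbds2 := dCell_bounds (arr.length : Int) w2 hN (by omega) (by omega)
    have hbds3 := dCell_bounds (arr.length : Int) w3 hN (by omega) hw.2.2.2
    refine ⟨w1, ⟨hw.1, by omega⟩, w2, ⟨by omega, by omega⟩, w3, ⟨by omega, hw.2.2.2⟩, ?_⟩
    simp only [condA, Bool.and_eq_true]
    refine ⟨⟨⟨?_, ?_⟩, ?_⟩, ?_⟩
    · rw [← he1]; exact hq1.1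
    · rw [← he2]; exact hq2.1
    · rw [← he3]; exact hq3.1
    · have hcs : get_caught (modGrid arr (arr.length : Int) w1 w2 w3) t 0 =
          !safe arr t (dCell (arr.length : Int) w1, dCell (arr.length : Int) w2,
            dCell (arr.length : Int) w3) :=
        caught_eq_safe arr t (dCell (arr.length : Int) w1) (dCell (arr.length : Int) w2)
          (dCell (arr.length : Int) w3) hPre hbds1 hbds2 hbds3
      rw [hcs, ← he1, ← he2, ← he3, hsafe]
      rfl

-- ---- B's rayWalk: accumulator normal form and cell facts ----
theorem rayWalk_acc (arr : List (List String)) (N r c dr dc : Int) :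
    ∀ (l : List Int) (acc : List (Int × Int)),
      rayWalk arr N r c dr dc l acc =
        (rayWalk arr N r c dr dc l []).map (acc ++ ·) := by
  intro l
  induction l with
  | nil => intro acc; rfl
  | cons i is ih =>
    intro acc
    simp only [rayWalk, List.nil_append]
    split_ifs with h1 h2 h3 h4
    all_goals first
      | rfl
      | exact ih acc
      | (rw [ih (acc ++ [(r + dr * i, c + dc * i)]), ih ([(r + dr * i, c + dc * i)]),
          Option.map_map]
         rcases rayWalk arr N r c dr dc is [] with _ | rest
         · rfl
         · simp)
      | simp

theorem rayWalk_cells (arr : List (List String)) (N r c dr dc : Int) :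
    ∀ (l : List Int) (cells : List (Int × Int)),
      rayWalk arr N r c dr dc l [] = some cells →
      ∀ p ∈ cells, (0 ≤ p.1 ∧ p.1 < N ∧ 0 ≤ p.2 ∧ p.2 < N) ∧
        (gGet arr p.1 p.2 == "X") = true := by
  intro l
  induction l with
  | nil => intro cells h; exact absurd h (by simp [rayWalk])
  | cons i is ih =>
    intro cells h p hp
    simp only [rayWalk, List.nil_append] at h
    split_ifs at h with h1 h2 h3 h4
    · -- "S": cells = []
      injection h with h
      subst h
      simp at hp
    · -- "X": one cell collected, rest from the tail walk
      rw [rayWalk_acc] at h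
      rcases Option.map_eq_some_iff.mp h with ⟨rest, hrest, hcells⟩
      subst hcells
      simp only [List.cons_append, List.nil_append, List.mem_cons] at hp
      rcases hp with rfl | hp
      · exact ⟨h1, h4⟩
      · exact ih rest hrest p hp
    · exact ih cells h p hp

theorem isWall_iff (W : (Int × Int) × (Int × Int) × (Int × Int)) (p : Int × Int) :
    isWall W p.1 p.2 = true ↔ p ∈ [W.1, W.2.1, W.2.2] := by
  rcases p with ⟨a, b⟩
  constructor
  · intro h
    simp only [isWall, Bool.or_eq_true, beq_iff_eq] at h
    rcases h with (h | h) | h <;> (rw [← h]; simp)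
  · intro h
    simp only [List.mem_cons, List.not_mem_nil, or_false] at h
    simp only [isWall, Bool.or_eq_true, beq_iff_eq]
    rcases h with h | h | h
    · exact Or.inl (Or.inl h.symm)
    · exact Or.inl (Or.inr h.symm)
    · exact Or.inr h.symm

-- ---- the caught test against a wall triple = "some constraint is missed" ----
theorem sRay_iff (arr : List (List String)) (N r c dr dc : Int)
    (W : (Int × Int) × (Int × Int) × (Int × Int))
    (hX : gGet arr W.1.1 W.1.2 = "X" ∧ gGet arr W.2.1.1 W.2.1.2 = "X" ∧
      gGet arr W.2.2.1 W.2.2.2 = "X") :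
    ∀ (k : Nat) (i0 nr0 nc0 : Int), i0 + k = N → nr0 = r + dr * (i0 - 1) →
      nc0 = c + dc * (i0 - 1) →
      (sRay arr N W dr dc nr0 nc0 k = true ↔
        ∃ cells, rayWalk arr N r c dr dc (PySem.List.pyRange i0 N 1) [] = some cells ∧
          ∀ p ∈ cells, isWall W p.1 p.2 = false) := by
  intro k
  induction k with
  | zero =>
    intro i0 nr0 nc0 hiN hnr hnc
    rw [PySem.List.pyRange_one_eq_nil (by omega)]
    simp [sRay, rayWalk]
  | succ k ih =>
    intro i0 nr0 nc0 hiN hnr hnc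
    have hlt : i0 < N := by omega
    rw [PySem.List.pyRange_one_cons hlt]
    simp only [sRay, rayWalk, List.nil_append]
    have e1 : nr0 + dr = r + dr * i0 := by rw [hnr]; ring
    have e2 : nc0 + dc = c + dc * i0 := by rw [hnc]; ring
    rw [e1, e2]
    by_cases hin : 0 ≤ r + dr * i0 ∧ r + dr * i0 < N ∧ 0 ≤ c + dc * i0 ∧ c + dc * i0 < N
    · rw [if_neg (not_not_intro hin), if_neg (not_not_intro hin)]
      by_cases hO : (gGet arr (r + dr * i0) (c + dc * i0) == "O") = true
      · rw [if_pos (by simp [hO]), if_pos hO]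
        simp
      · by_cases hw : isWall W (r + dr * i0) (c + dc * i0) = true
        · have hXP : gGet arr (r + dr * i0) (c + dc * i0) = "X" := by
            have hmem := (isWall_iff W (r + dr * i0, c + dc * i0)).mp hw
            simp only [List.mem_cons, List.not_mem_nil, or_false] at hmem
            rcases hmem with h | h | h
            · rw [show r + dr * i0 = W.1.1 from congrArg Prod.fst h,
                show c + dc * i0 = W.1.2 from congrArg Prod.snd h]
              exact hX.1
            · rw [show r + dr * i0 = W.2.1.1 from congrArg Prod.fst h,
                show c + dc * i0 = W.2.1.2 from congrArg Prod.snd h]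
              exact hX.2.1
            · rw [show r + dr * i0 = W.2.2.1 from congrArg Prod.fst h,
                show c + dc * i0 = W.2.2.2 from congrArg Prod.snd h]
              exact hX.2.2
          rw [if_pos (by simp [hw]), if_neg hO, if_neg (by simp [hXP]),
            if_pos (by simp [hXP]), rayWalk_acc]
          simp only [Bool.false_eq_true, false_iff]
          rintro ⟨cells, hc, hall⟩
          rcases Option.map_eq_some_iff.mp hc with ⟨rest, hrest, hcells⟩
          subst hcells
          have := hall (r + dr * i0, c + dc * i0) (by simp)
          rw [hw] at this
          exact absurd this (by simp)
        · have hwf : isWall W (r + dr * i0) (c + dc * i0) = false := by simpa using hw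
          rw [if_neg (by simp [hO, hwf])]
          by_cases hS : (gGet arr (r + dr * i0) (c + dc * i0) == "S") = true
          · rw [if_pos hS, if_neg hO, if_pos hS]
            simp
          · rw [if_neg hS, if_neg hO, if_neg hS]
            by_cases hXc : (gGet arr (r + dr * i0) (c + dc * i0) == "X") = true
            · rw [if_pos hXc,
                ih (i0 + 1) (r + dr * i0) (c + dc * i0) (by omega) (by ring) (by ring)]
              have hacc := rayWalk_acc arr N r c dr dc
                (PySem.List.pyRange (i0 + 1) N 1) [(r + dr * i0, c + dc * i0)]
              constructor
              · rintro ⟨cells, hc, hall⟩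
                refine ⟨(r + dr * i0, c + dc * i0) :: cells, ?_, ?_⟩
                · rw [hacc, hc]; rfl
                · intro p hp
                  rcases List.mem_cons.mp hp with rfl | hp
                  · exact hwf
                  · exact hall p hp
              · rintro ⟨cells', hc', hall'⟩
                rw [hacc] at hc'
                rcases Option.map_eq_some_iff.mp hc' with ⟨rest, hrest, hcells⟩
                subst hcells
                exact ⟨rest, hrest, fun p hp => hall' p (by simp [hp])⟩
            · rw [if_neg hXc]
              exact ih (i0 + 1) (r + dr * i0) (c + dc * i0) (by omega) (by ring) (by ring)
    · rw [if_pos hin, if_pos hin]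
      simp

theorem mem_sight_segments (arr : List (List String)) (t : List (Int × Int))
    (s : List (Int × Int)) :
    s ∈ sight_segments arr t ↔ ∃ p ∈ t,
      ∃ d ∈ ([(1, 0), (-1, 0), (0, 1), (0, -1)] : List (Int × Int)),
        rayWalk arr (arr.length : Int) p.1 p.2 d.1 d.2
          (PySem.List.pyRange 1 (arr.length : Int) 1) [] = some s := by
  unfold sight_segments
  rw [PySem.List.len_eq]
  simp [List.mem_flatMap, List.mem_filterMap]

theorem safe_iff (arr : List (List String)) (t : List (Int × Int))
    (W : (Int × Int) × (Int × Int) × (Int × Int)) (hN : 1 ≤ (arr.length : Int))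
    (hX : gGet arr W.1.1 W.1.2 = "X" ∧ gGet arr W.2.1.1 W.2.1.2 = "X" ∧
      gGet arr W.2.2.1 W.2.2.2 = "X") :
    safe arr t W = true ↔ HitsAll [W.1, W.2.1, W.2.2] (sight_segments arr t) := by
  have hiff : safe arr t W = true ↔ ∀ p ∈ t,
      ∀ d ∈ ([(1, 0), (-1, 0), (0, 1), (0, -1)] : List (Int × Int)),
      ¬ sRay arr (arr.length : Int) W d.1 d.2 p.1 p.2 ((arr.length : Int) - 1).toNat = true := by
    have h0 : safe arr t W = !(sTeach arr (arr.length : Int) W t) := by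
      unfold safe; rw [PySem.List.len_eq]
    rw [h0, Bool.not_eq_true', sTeach_any, List.any_eq_false]
    constructor
    · intro h p hp d hd hr
      have hsd := h p hp
      rw [sDir_any, Bool.not_eq_true, List.any_eq_false] at hsd
      exact hsd d hd hr
    · intro h p hp
      rw [sDir_any, Bool.not_eq_true, List.any_eq_false]
      exact h p hp
  rw [hiff]
  constructor
  · intro hall s hs
    rcases (mem_sight_segments arr t s).mp hs with ⟨p, hp, d, hd, hray⟩
    have hr := hall p hp d hd
    rw [sRay_iff arr (arr.length : Int) p.1 p.2 d.1 d.2 W hX ((arr.length : Int) - 1).toNat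
      1 p.1 p.2 (by omega) (by ring) (by ring)] at hr
    have hno : ¬ ∀ q ∈ s, isWall W q.1 q.2 = false := fun hnone => hr ⟨s, hray, hnone⟩
    push_neg at hno
    rcases hno with ⟨q, hq, hqw⟩
    have hqt : isWall W q.1 q.2 = true := by
      revert hqw; cases isWall W q.1 q.2 <;> simp
    exact ⟨q, (isWall_iff W q).mp hqt, hq⟩
  · intro hhits p hp d hd
    rw [sRay_iff arr (arr.length : Int) p.1 p.2 d.1 d.2 W hX ((arr.length : Int) - 1).toNat
      1 p.1 p.2 (by omega) (by ring) (by ring)]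
    rintro ⟨cells, hc, hall⟩
    have hmem : cells ∈ sight_segments arr t :=
      (mem_sight_segments arr t cells).mpr ⟨p, hp, d, hd, hc⟩
    rcases hhits cells hmem with ⟨w, hw1, hw2⟩
    have := hall w hw2
    rw [(isWall_iff W w).mpr hw1] at this
    exact absurd this (by simp)

-- ---- cover: soundness and completeness of the branching hitting-set search ----
theorem coverFind_complete (segs : List (List (Int × Int))) :
    ∀ (depth : Nat) (walls : List (Int × Int)) (rest : List (List (Int × Int))),
      (∀ s ∈ rest, s ∈ segs) →
      (∃ E : List (Int × Int), E.length ≤ depth ∧ HitsAll (walls ++ E) segs) →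
      coverFind segs walls depth rest = true := by
  intro depth
  induction depth with
  | zero =>
    intro walls rest
    induction rest with
    | nil => intro _ _; simp [coverFind]
    | cons s rest' ihr =>
      rintro hsub ⟨E, hE, hh⟩
      have hE0 : E = [] := List.eq_nil_of_length_eq_zero (by omega)
      subst hE0
      rcases hh s (hsub s (by simp)) with ⟨w, hw, hws⟩
      rw [List.append_nil] at hw
      have hany : walls.any (fun w => s.contains w) = true :=
        List.any_eq_true.mpr ⟨w, hw, by simpa using hws⟩
      unfold coverFind
      rw [if_pos hany]
      exact ihr (fun x hx => hsub x (by simp [hx])) ⟨[], by simp, by simpa using hh⟩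
  | succ d ihd =>
    intro walls rest
    induction rest with
    | nil => intro _ _; simp [coverFind]
    | cons s rest' ihr =>
      rintro hsub ⟨E, hE, hh⟩
      unfold coverFind
      by_cases hany : walls.any (fun w => s.contains w) = true
      · rw [if_pos hany]
        exact ihr (fun x hx => hsub x (by simp [hx])) ⟨E, hE, hh⟩
      · rw [if_neg hany]
        rcases hh s (hsub s (by simp)) with ⟨w, hw, hws⟩
        have hwE : w ∈ E := by
          rcases List.mem_append.mp hw with h | h
          · exact absurd (List.any_eq_true.mpr ⟨w, h, by simpa using hws⟩) hany
          · exact h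
        show (s.any fun cell => coverFind segs (walls ++ [cell]) d segs) = true
        rw [List.any_eq_true]
        refine ⟨w, hws, ?_⟩
        apply ihd (walls ++ [w]) segs (fun x hx => hx)
        refine ⟨E.erase w, ?_, ?_⟩
        · have := List.length_erase_of_mem hwE
          omega
        · intro s' hs'
          rcases hh s' hs' with ⟨v, hv, hvs⟩
          rcases List.mem_append.mp hv with h | h
          · exact ⟨v, by simp [h], hvs⟩
          · by_cases hvw : v = w
            · exact ⟨v, by simp [hvw], hvs⟩
            · exact ⟨v, by simp [(List.mem_erase_of_ne hvw).mpr h], hvs⟩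

theorem coverFind_sound (segs : List (List (Int × Int))) :
    ∀ (depth : Nat) (walls : List (Int × Int)) (rest : List (List (Int × Int))),
      (∀ s ∈ rest, s ∈ segs) →
      coverFind segs walls depth rest = true →
      ∃ E : List (Int × Int), E.length ≤ depth ∧ (∀ w ∈ E, ∃ s ∈ segs, w ∈ s) ∧
        ∀ s ∈ rest, ∃ w ∈ walls ++ E, w ∈ s := by
  intro depth
  induction depth with
  | zero =>
    intro walls rest
    induction rest with
    | nil => intro _ _; exact ⟨[], by simp, by simp, by simp⟩
    | cons s rest' ihr =>
      intro hsub h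
      unfold coverFind at h
      by_cases hany : walls.any (fun w => s.contains w) = true
      · rw [if_pos hany] at h
        rcases ihr (fun x hx => hsub x (by simp [hx])) h with ⟨E, hE, hcells, hhits⟩
        refine ⟨E, hE, hcells, ?_⟩
        intro s' hs'
        rcases List.mem_cons.mp hs' with rfl | hs'
        · rcases List.any_eq_true.mp hany with ⟨w, hw, hws⟩
          exact ⟨w, List.mem_append_left _ hw, by simpa using hws⟩
        · exact hhits s' hs'
      · rw [if_neg hany] at h
        exact absurd h (by simp)
  | succ d ihd =>
    intro walls rest
    induction rest with
    | nil => intro _ _; exact ⟨[], by simp, by simp, by simp⟩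
    | cons s rest' ihr =>
      intro hsub h
      unfold coverFind at h
      by_cases hany : walls.any (fun w => s.contains w) = true
      · rw [if_pos hany] at h
        rcases ihr (fun x hx => hsub x (by simp [hx])) h with ⟨E, hE, hcells, hhits⟩
        refine ⟨E, hE, hcells, ?_⟩
        intro s' hs'
        rcases List.mem_cons.mp hs' with rfl | hs'
        · rcases List.any_eq_true.mp hany with ⟨w, hw, hws⟩
          exact ⟨w, List.mem_append_left _ hw, by simpa using hws⟩
        · exact hhits s' hs'
      · rw [if_neg hany] at h
        replace h : (s.any fun cell => coverFind segs (walls ++ [cell]) d segs) = true := h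
        rcases List.any_eq_true.mp h with ⟨cell, hcell, hrec⟩
        rcases ihd (walls ++ [cell]) segs (fun x hx => hx) hrec with ⟨E', hE', hcells', hhits'⟩
        refine ⟨cell :: E', by simp [List.length_cons]; omega, ?_, ?_⟩
        · intro w hw
          rcases List.mem_cons.mp hw with rfl | hw
          · exact ⟨s, hsub s (by simp), hcell⟩
          · exact hcells' w hw
        · intro s' hs'
          have hs'seg : s' ∈ segs := hsub s' hs'
          rcases hhits' s' hs'seg with ⟨v, hv, hvs⟩
          refine ⟨v, ?_, hvs⟩
          simp only [List.mem_append, List.mem_cons] at hv ⊢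
          tauto

-- ---- extending a small wall set to a triple of distinct empty cells ----
theorem exists_triple_sublist (L W : List (Int × Int)) (hL : L.Nodup) (hW : W.Nodup)
    (hsub : ∀ x ∈ W, x ∈ L) (hWlen : W.length ≤ 3) (hLlen : 3 ≤ L.length) :
    ∃ q1 q2 q3 : Int × Int, List.Sublist [q1, q2, q3] L ∧ ∀ x ∈ W, x ∈ [q1, q2, q3] := by
  classical
  set F := L.filter (fun x => decide (x ∉ W)) with hF
  have hFsub : ∀ x ∈ F, x ∈ L ∧ x ∉ W := by
    intro x hx
    have := List.mem_filter.mp hx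
    exact ⟨this.1, by simpa using this.2⟩
  have hWF : (W ++ F).Nodup := by
    refine List.Nodup.append hW (hL.filter _) ?_
    intro a ha haf
    exact (hFsub a haf).2 ha
  have hLsub : ∀ x ∈ L, x ∈ W ++ F := by
    intro x hx
    rw [List.mem_append]
    by_cases hxW : x ∈ W
    · exact Or.inl hxW
    · exact Or.inr (List.mem_filter.mpr ⟨hx, by simpa using hxW⟩)
  have hlen : 3 ≤ (W ++ F).length := by
    have := (hL.subperm hLsub).length_le
    omega
  set M := (W ++ F).take 3 with hM
  have hMlen : M.length = 3 := by
    rw [hM, List.length_take]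
    omega
  have hMnodup : M.Nodup := (List.take_sublist _ _).nodup hWF
  have hWM : ∀ x ∈ W, x ∈ M := by
    intro x hx
    rw [hM, List.take_append, List.take_of_length_le hWlen]
    exact List.mem_append_left _ hx
  have hML : ∀ x ∈ M, x ∈ L := by
    intro x hx
    have hx' : x ∈ W ++ F := (List.take_sublist _ _).mem hx
    rcases List.mem_append.mp hx' with h | h
    · exact hsub x h
    · exact (hFsub x h).1
  obtain ⟨l', hperm, hsubl⟩ := hMnodup.subperm hML
  have hl'len : l'.length = 3 := by rw [hperm.length_eq, hMlen]
  rcases l' with _ | ⟨q1, _ | ⟨q2, _ | ⟨q3, _ | _⟩⟩⟩ <;> simp at hl'len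
  refine ⟨q1, q2, q3, hsubl, ?_⟩
  intro x hx
  exact hperm.mem_iff.mpr (hWM x hx)

-- ---- the empty-cell count of solution_alt ----
theorem countX_eq (arr : List (List String)) :
    ((PySem.List.pyRange 0 (PySem.List.len arr) 1).foldl (fun acc r =>
      (PySem.List.pyRange 0 (PySem.List.len arr) 1).foldl
        (fun acc2 c => if gGet arr r c == "X" then acc2 + 1 else acc2) acc) (0 : Int)) =
      ((empt arr).length : Int) := by
  have hcast : ∀ l : List Nat, ((l.sum : Nat) : Int) = (List.map (fun n : Nat => (n : Int)) l).sum := by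
    intro l
    induction l with
    | nil => simp
    | cons a tl ih => simp [ih]
  simp only [PySem.List.len_eq]
  have hinner : ∀ (acc r : Int), r ∈ PySem.List.pyRange 0 (arr.length : Int) 1 →
      (PySem.List.pyRange 0 (arr.length : Int) 1).foldl
        (fun acc2 c => if gGet arr r c == "X" then acc2 + 1 else acc2) acc =
      acc + (((PySem.List.pyRange 0 (arr.length : Int) 1).countP
        (fun c => gGet arr r c == "X") : Nat) : Int) := by
    intro acc r _
    exact PySem.List.foldl_if_add_one _ _ _
  rw [PySem.List.foldl_congr_mem (PySem.List.pyRange 0 (arr.length : Int) 1) _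
    (fun acc r => acc + (((PySem.List.pyRange 0 (arr.length : Int) 1).countP
      (fun c => gGet arr r c == "X") : Nat) : Int)) 0 hinner,
    PySem.List.foldl_add]
  unfold empt
  simp only [PySem.List.len_eq]
  rw [List.length_flatMap]
  have hlen : ∀ r : Int,
      ((PySem.List.pyRange 0 (arr.length : Int) 1).filterMap
        (fun c => if gGet arr r c == "X" then some (r, c) else none)).length =
      (PySem.List.pyRange 0 (arr.length : Int) 1).countP
        (fun c => gGet arr r c == "X") := by
    intro r
    rw [show ((PySem.List.pyRange 0 (arr.length : Int) 1).filterMap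
        (fun c => if gGet arr r c == "X" then some (r, c) else none)) =
      ((PySem.List.pyRange 0 (arr.length : Int) 1).map (fun c => (r, c))).filter
        (fun p => gGet arr p.1 p.2 == "X") from
      filterMap_if_eq_filter_map _ (fun c => (r, c)) (fun p => gGet arr p.1 p.2 == "X")]
    rw [← List.countP_eq_length_filter, List.countP_map]
    rfl
  simp only [hlen]
  rw [hcast, List.map_map]
  simp [Function.comp_def]

-- ---- the main bridge ----
theorem EAb_eq_cover (arr : List (List String)) (t : List (Int × Int))
    (hPre : ∀ row ∈ arr, arr.length ≤ row.length) (hN : 1 ≤ (arr.length : Int)) :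
    EAb arr t = true ↔
      (3 ≤ (empt arr).length ∧ cover (sight_segments arr t) [] 3 = true) := by
  rw [EAb_iff arr t hPre]
  constructor
  · rintro ⟨q1, q2, q3, hsub, hsafe⟩
    have hq1 := mem_empt arr q1 (hsub.mem (by simp))
    have hq2 := mem_empt arr q2 (hsub.mem (by simp))
    have hq3 := mem_empt arr q3 (hsub.mem (by simp))
    refine ⟨by simpa using hsub.length_le, ?_⟩
    unfold cover
    apply coverFind_complete _ 3 [] _ (fun s hs => hs)
    refine ⟨[q1, q2, q3], by simp, ?_⟩
    have hhits := (safe_iff arr t (q1, q2, q3) hN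
      ⟨by simpa using hq1.1, by simpa using hq2.1, by simpa using hq3.1⟩).mp hsafe
    intro s hs
    rcases hhits s hs with ⟨w, hw1, hw2⟩
    exact ⟨w, by simpa using hw1, hw2⟩
  · rintro ⟨hlen, hcov⟩
    unfold cover at hcov
    rcases coverFind_sound _ 3 [] _ (fun s hs => hs) hcov with ⟨E, hElen, hEcells, hEhits⟩
    have hWnodup : E.dedup.Nodup := E.nodup_dedup
    have hWsub : ∀ x ∈ E.dedup, x ∈ empt arr := by
      intro x hx
      rw [List.mem_dedup] at hx
      rcases hEcells x hx with ⟨s, hs, hxs⟩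
      rcases (mem_sight_segments arr t s).mp hs with ⟨p, hp, d, hd, hray⟩
      have hc := rayWalk_cells arr (arr.length : Int) p.1 p.2 d.1 d.2 _ s hray x hxs
      exact mem_empt_intro arr x ⟨hc.1.1, hc.1.2.1⟩ ⟨hc.1.2.2.1, hc.1.2.2.2⟩ hc.2
    have hWlen : E.dedup.length ≤ 3 := le_trans (List.Sublist.length_le E.dedup_sublist) hElen
    rcases exists_triple_sublist (empt arr) E.dedup (nodup_empt arr) hWnodup hWsub hWlen hlen with
      ⟨q1, q2, q3, hsub, hWin⟩
    refine ⟨q1, q2, q3, hsub, ?_⟩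
    have hq1 := mem_empt arr q1 (hsub.mem (by simp))
    have hq2 := mem_empt arr q2 (hsub.mem (by simp))
    have hq3 := mem_empt arr q3 (hsub.mem (by simp))
    rw [safe_iff arr t (q1, q2, q3) hN
      ⟨by simpa using hq1.1, by simpa using hq2.1, by simpa using hq3.1⟩]
    intro s hs
    rcases hEhits s hs with ⟨v, hv, hvs⟩
    rw [List.nil_append] at hv
    exact ⟨v, by simpa using hWin v (List.mem_dedup.mpr hv), hvs⟩

-- ===== VERDICT (by name: the statement is the Claim_ definition above) =====
theorem solution_spec : Claim_equal_solution := by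
  intro arr t_arr _ hPre
  unfold Spec_solution
  rw [solution_eq]
  have halt : solution_alt arr t_arr =
      if ((PySem.List.pyRange 0 (PySem.List.len arr) 1).foldl (fun acc r =>
          (PySem.List.pyRange 0 (PySem.List.len arr) 1).foldl
            (fun acc2 c => if gGet arr r c == "X" then acc2 + 1 else acc2) acc) (0 : Int)) < 3
        then "NO"
        else if cover (sight_segments arr t_arr) [] 3 then "YES" else "NO" := rfl
  rw [halt, countX_eq]
  by_cases harr : arr.length = 0
  · have hE : EAb arr t_arr = false := by
      unfold EAb
      rw [PySem.List.len_eq, harr]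
      norm_num [PySem.List.pyRange_one_eq_nil]
    have hempt : (empt arr).length = 0 := by
      have : empt arr = [] := by
        unfold empt
        rw [PySem.List.len_eq, harr]
        norm_num [PySem.List.pyRange_one_eq_nil]
      rw [this]
      rfl
    rw [hE, hempt]
    norm_num
  · have hN : 1 ≤ (arr.length : Int) := by
      have := Nat.pos_of_ne_zero harr
      omega
    have hkey := EAb_eq_cover arr t_arr hPre hN
    cases hEA : EAb arr t_arr with
    | true =>
      obtain ⟨hlen, hcov⟩ := hkey.mp hEA
      rw [if_pos rfl, if_neg (show ¬((empt arr).length : Int) < 3 by omega), hcov, if_pos rfl]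
    | false =>
      rw [if_neg (show ¬false = true by simp)]
      by_cases hlen : ((empt arr).length : Int) < 3
      · rw [if_pos hlen]
      · rw [if_neg hlen]
        have hcov : cover (sight_segments arr t_arr) [] 3 = false := by
          cases hcv : cover (sight_segments arr t_arr) [] 3
          · rfl
          · exfalso
            have hcontra : EAb arr t_arr = true := hkey.mpr ⟨by omega, hcv⟩
            rw [hEA] at hcontra
            exact absurd hcontra (by simp)
        rw [hcov, if_neg (show ¬false = true by simp)]
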